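-- pv_equiv track=rewrite | github.com/zhenshan-bing/RL_Nermo | nermo_rl_locomotion/utils/evaluation_util.py | build_foot_stride_phases
-- ===== SOURCE A (Python) =====
-- from typing import Dict, List
--
-- def build_foot_stride_phases(episode_infos: List[Dict[str, any]], phase_gap_tolerance=0, min_phase_steps=0):
--     foot_stance_phases = {
--         "lf": [(1, 0)],
--         "rf": [(1, 0)],
--         "rh": [(1, 0)],
--         "lh": [(1, 0)]
--     }
--
--     foot_swing_phases = {
--         "lf": [(1, 0)],
--         "rf": [(1, 0)],
--         "rh": [(1, 0)],
--         "lh": [(1, 0)]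
--     }
--
--     for step, info in enumerate(episode_infos):
--         for foot, has_contact in info.get("foot_contacts").items():
--             if has_contact:
--                 if sum(foot_stance_phases[foot][-1]) + phase_gap_tolerance < step:
--                     # Beginning of a new stance phase
--                     foot_stance_phases[foot].append((step+1, 0))
--                 else:
--                     # Extend the current stance phase up to the current step
--                     foot_stance_phases[foot][-1] = (foot_stance_phases[foot][-1][0], (step + 1) - foot_stance_phases[foot][-1][0])
--             else:
--                 if sum(foot_swing_phases[foot][-1]) + phase_gap_tolerance < step:
--                     # Beginning of a new swing phase
--                     foot_swing_phases[foot].append((step+1, 0))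
--                 else:
--                     # Extend the current swing phase up to the current step
--                     foot_swing_phases[foot][-1] = (foot_swing_phases[foot][-1][0], (step + 1) - foot_swing_phases[foot][-1][0])
--
--     for foot_phases in [foot_stance_phases, foot_swing_phases]:
--         for foot, phases in foot_phases.items():
--             foot_phases[foot] = [phase for phase in phases if phase[1] >= min_phase_steps]
--
--     return foot_stance_phases, foot_swing_phases
-- ===== SOURCE B (Python) =====
-- def _phases_from_steps(steps, tol, min_len):
--     phases = [(1, 0)]
--     for s in steps:
--         start, length = phases[-1]
--         if start + length + tol < s:
--             phases.append((s + 1, 0))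
--         else:
--             phases[-1] = (start, (s + 1) - start)
--     return [p for p in phases if p[1] >= min_len]
--
-- def build_foot_stride_phases(episode_infos, phase_gap_tolerance=0, min_phase_steps=0):
--     stance, swing = {}, {}
--     for foot in ("lf", "rf", "rh", "lh"):
--         contact_steps, free_steps = [], []
--         for step, info in enumerate(episode_infos):
--             fc = info.get("foot_contacts")
--             if foot in fc:
--                 (contact_steps if fc[foot] else free_steps).append(step)
--         stance[foot] = _phases_from_steps(contact_steps, phase_gap_tolerance, min_phase_steps)
--         swing[foot] = _phases_from_steps(free_steps, phase_gap_tolerance, min_phase_steps)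
--     return stance, swing
-- ===== Notes on version B (the rewrite author's own statement) =====
-- stated objective: alternative
-- what changed: Replaces A's step-major loop mutating a pair of four-entry phase dicts with a per-foot decomposition: for each foot, one scan collects its contact and no-contact step indices, and a separate run-merge pass builds and filters that foot's phases from the index list.
import Mathlib
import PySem

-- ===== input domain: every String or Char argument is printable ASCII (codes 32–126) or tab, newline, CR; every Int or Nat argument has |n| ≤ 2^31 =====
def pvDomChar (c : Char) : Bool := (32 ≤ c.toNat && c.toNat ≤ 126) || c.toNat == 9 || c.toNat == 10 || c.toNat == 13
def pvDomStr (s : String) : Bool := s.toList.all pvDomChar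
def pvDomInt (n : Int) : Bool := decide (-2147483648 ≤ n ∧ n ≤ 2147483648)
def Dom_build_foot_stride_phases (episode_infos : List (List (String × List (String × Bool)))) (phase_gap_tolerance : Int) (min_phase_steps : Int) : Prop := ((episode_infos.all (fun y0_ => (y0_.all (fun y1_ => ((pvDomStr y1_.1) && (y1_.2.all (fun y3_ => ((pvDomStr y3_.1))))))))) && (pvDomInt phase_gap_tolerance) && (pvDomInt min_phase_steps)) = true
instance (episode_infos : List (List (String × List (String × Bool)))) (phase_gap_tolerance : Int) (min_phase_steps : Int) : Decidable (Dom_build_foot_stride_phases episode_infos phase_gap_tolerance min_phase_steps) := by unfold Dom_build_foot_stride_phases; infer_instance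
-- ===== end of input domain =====

-- B replaces A's step-major loop over a mutable pair of dicts by a per-foot decomposition
-- (collect each foot's contact / no-contact step indices, then build and filter that foot's
-- phases in one pass); objective: alternative decomposition, same asymptotic cost.

-- ===== PORT A =====

-- Python dict assignment d[k] = v: overwrite the first matching key in place, append if absent
def pvSet (d : List (String × List (Int × Int))) (k : String) (v : List (Int × Int)) :
    List (String × List (Int × Int)) :=
  match d with
  | [] => [(k, v)]
  | (k', v') :: rest => if k' == k then (k', v) :: rest else (k', v') :: pvSet rest k v

-- the body of A's if/else on one phase list (phases[-1] on the seeded list is never empty in A;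
-- the 'none' branch is unreachable under Pre_)
def pvTouchA (tol step : Int) (phs : List (Int × Int)) : List (Int × Int) :=
  match phs.getLast? with
  | none => phs
  | some (s, l) =>
    if s + l + tol < step then phs ++ [(step + 1, 0)]
    else phs.dropLast ++ [(s, (step + 1) - s)]

-- one iteration of A's outer loop: 'for foot, has_contact in info.get("foot_contacts").items()'
def pvStepA (tol step : Int)
    (st : List (String × List (Int × Int)) × List (String × List (Int × Int)))
    (info : List (String × List (String × Bool))) :
    List (String × List (Int × Int)) × List (String × List (Int × Int)) :=
  ((info.lookup "foot_contacts").getD []).foldl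
    (fun sw fb =>
      if fb.2 then (pvSet sw.1 fb.1 (pvTouchA tol step ((sw.1.lookup fb.1).getD [])), sw.2)
      else (sw.1, pvSet sw.2 fb.1 (pvTouchA tol step ((sw.2.lookup fb.1).getD []))))
    st

-- 'for step, info in enumerate(episode_infos)'
def pvLoopA (tol : Int) : Int → List (List (String × List (String × Bool))) →
    List (String × List (Int × Int)) × List (String × List (Int × Int)) →
    List (String × List (Int × Int)) × List (String × List (Int × Int))
  | _, [], st => st
  | step, info :: rest, st => pvLoopA tol (step + 1) rest (pvStepA tol step st info)

def build_foot_stride_phases (episode_infos : List (List (String × List (String × Bool)))) (phase_gap_tolerance : Int) (min_phase_steps : Int) : (List (String × List (Int × Int))) × (List (String × List (Int × Int))) :=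
  let init : List (String × List (Int × Int)) :=
    [("lf", [(1, 0)]), ("rf", [(1, 0)]), ("rh", [(1, 0)]), ("lh", [(1, 0)])]
  let st := pvLoopA phase_gap_tolerance 0 episode_infos (init, init)
  (st.1.map (fun e => (e.1, e.2.filter (fun p => decide (min_phase_steps ≤ p.2)))),
   st.2.map (fun e => (e.1, e.2.filter (fun p => decide (min_phase_steps ≤ p.2)))))

-- ===== PORT B =====

-- B's inner scan: the indices of the steps where 'foot' has / has no contact
def pvFootStepsB (foot : String) : Int → List (List (String × List (String × Bool))) →
    List Int × List Int
  | _, [] => ([], [])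
  | step, info :: rest =>
    let cf := pvFootStepsB foot (step + 1) rest
    match ((info.lookup "foot_contacts").getD []).lookup foot with
    | none => cf
    | some b => if b then (step :: cf.1, cf.2) else (cf.1, step :: cf.2)

-- B's _phases_from_steps: run-merge the index list starting from the (1,0) sentinel, then filter
def pvPhasesB (tol minp : Int) (steps : List Int) : List (Int × Int) :=
  (steps.foldl
      (fun phs s =>
        match phs.getLast? with
        | none => phs
        | some (st, ln) =>
          if st + ln + tol < s then phs ++ [(s + 1, 0)]
          else phs.dropLast ++ [(st, (s + 1) - st)])
      [(1, 0)]).filter (fun p => decide (minp ≤ p.2))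

def build_foot_stride_phases_alt (episode_infos : List (List (String × List (String × Bool)))) (phase_gap_tolerance : Int) (min_phase_steps : Int) : (List (String × List (Int × Int))) × (List (String × List (Int × Int))) :=
  ["lf", "rf", "rh", "lh"].foldl
    (fun acc foot =>
      let cf := pvFootStepsB foot 0 episode_infos
      (acc.1 ++ [(foot, pvPhasesB phase_gap_tolerance min_phase_steps cf.1)],
       acc.2 ++ [(foot, pvPhasesB phase_gap_tolerance min_phase_steps cf.2)]))
    ([], [])

-- ===== PRECONDITION & SPEC =====
-- Pre_ excludes infos without a "foot_contacts" entry (A raises AttributeError on None.items())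
-- and foot names other than the four feet (A raises KeyError); it also excludes association
-- lists with duplicate keys, which cannot arise from a Python dict.
def Pre_build_foot_stride_phases (episode_infos : List (List (String × List (String × Bool)))) (phase_gap_tolerance : Int) (min_phase_steps : Int) : Prop :=
  ∀ info ∈ episode_infos,
    (info.map Prod.fst).Nodup ∧
    (info.lookup "foot_contacts").isSome ∧
    (((info.lookup "foot_contacts").getD []).map Prod.fst).Nodup ∧
    ∀ p ∈ (info.lookup "foot_contacts").getD [], p.1 ∈ ["lf", "rf", "rh", "lh"]
instance (episode_infos : List (List (String × List (String × Bool)))) (phase_gap_tolerance : Int) (min_phase_steps : Int) : Decidable (Pre_build_foot_stride_phases episode_infos phase_gap_tolerance min_phase_steps) := by unfold Pre_build_foot_stride_phases; infer_instance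

def pvWitness_build_foot_stride_phases : (List (List (String × List (String × Bool)))) × Int × Int :=
  ([[("foot_contacts", [("lf", true), ("rf", false)])],
    [("foot_contacts", [("lf", true), ("rf", true), ("rh", false), ("lh", false)])]], 0, 0)

def Spec_build_foot_stride_phases (episode_infos : List (List (String × List (String × Bool)))) (phase_gap_tolerance : Int) (min_phase_steps : Int) (out : (List (String × List (Int × Int))) × (List (String × List (Int × Int)))) : Prop := out = build_foot_stride_phases_alt episode_infos phase_gap_tolerance min_phase_steps
instance (episode_infos : List (List (String × List (String × Bool)))) (phase_gap_tolerance : Int) (min_phase_steps : Int) (out : (List (String × List (Int × Int))) × (List (String × List (Int × Int)))) : Decidable (Spec_build_foot_stride_phases episode_infos phase_gap_tolerance min_phase_steps out) := by unfold Spec_build_foot_stride_phases; infer_instance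

-- ===== CLAIM (what is proved, stated in full; the proofs are below) =====
def Claim_equal_build_foot_stride_phases : Prop := ∀ (episode_infos : List (List (String × List (String × Bool)))) (phase_gap_tolerance : Int) (min_phase_steps : Int), Dom_build_foot_stride_phases episode_infos phase_gap_tolerance min_phase_steps → Pre_build_foot_stride_phases episode_infos phase_gap_tolerance min_phase_steps → Spec_build_foot_stride_phases episode_infos phase_gap_tolerance min_phase_steps (build_foot_stride_phases episode_infos phase_gap_tolerance min_phase_steps)

-- ===== LEMMAS AND PROOFS =====

theorem lookup_none {β : Type} (k : String) (t : List (String × β)) (h : k ∉ t.map Prod.fst) : t.lookup k = none := by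
  induction t with
  | nil => rfl
  | cons hd tl ih =>
    simp only [List.map_cons, List.mem_cons, not_or] at h
    have hb : (k == hd.1) = false := beq_eq_false_iff_ne.mpr h.1
    simp [List.lookup, ih h.2, hb]

-- the 4-key dict state of A's loop
def pvQ (a b c d : List (Int × Int)) : List (String × List (Int × Int)) :=
  [("lf", a), ("rf", b), ("rh", c), ("lh", d)]

-- pointwise effect of one info on one foot's phase list
def pvUpd (tol step : Int) (v : Bool) (fc : List (String × Bool)) (k : String)
    (x : List (Int × Int)) : List (Int × Int) :=
  match fc.lookup k with
  | some b => if b == v then pvTouchA tol step x else x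
  | none => x

def pvFold (tol : Int) (steps : List Int) (init : List (Int × Int)) : List (Int × Int) :=
  steps.foldl (fun phs s => pvTouchA tol s phs) init

theorem pvPhasesB_eq (tol minp : Int) (steps : List Int) :
    pvPhasesB tol minp steps =
      (pvFold tol steps [(1, 0)]).filter (fun p => decide (minp ≤ p.2)) := by
  simp only [pvPhasesB, pvFold, pvTouchA]

theorem pv_inner (tol step : Int) :
    ∀ (fc : List (String × Bool)), (fc.map Prod.fst).Nodup →
    (∀ p ∈ fc, p.1 ∈ ["lf", "rf", "rh", "lh"]) →
    ∀ a b c d e f g h,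
    fc.foldl
      (fun sw fb =>
        if fb.2 then (pvSet sw.1 fb.1 (pvTouchA tol step ((sw.1.lookup fb.1).getD [])), sw.2)
        else (sw.1, pvSet sw.2 fb.1 (pvTouchA tol step ((sw.2.lookup fb.1).getD []))))
      (pvQ a b c d, pvQ e f g h) =
    (pvQ (pvUpd tol step true fc "lf" a) (pvUpd tol step true fc "rf" b)
         (pvUpd tol step true fc "rh" c) (pvUpd tol step true fc "lh" d),
     pvQ (pvUpd tol step false fc "lf" e) (pvUpd tol step false fc "rf" f)
         (pvUpd tol step false fc "rh" g) (pvUpd tol step false fc "lh" h)) := by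
  intro fc
  induction fc with
  | nil =>
    intro _ _ a b c d e f g h
    simp [pvUpd, List.lookup]
  | cons hd t ih =>
    intro hnd hmem a b c d e f g h
    obtain ⟨k, bb⟩ := hd
    have hk : k = "lf" ∨ k = "rf" ∨ k = "rh" ∨ k = "lh" := by
      simpa using hmem (k, bb) (List.mem_cons_self ..)
    simp only [List.map_cons, List.nodup_cons] at hnd
    have hkt : t.lookup k = none := lookup_none k t hnd.1
    have ih' := ih hnd.2 (fun p hp => hmem p (List.mem_cons_of_mem _ hp))
    simp only [pvQ] at ih'
    rcases hk with h|h|h|h <;> subst h <;> cases bb <;>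
      simp only [List.foldl_cons] <;>
      simp [pvQ, pvSet, List.lookup] <;>
      rw [ih'] <;>
      simp [pvUpd, List.lookup, hkt]

theorem pv_steps1 (tol i : Int) (info : List (String × List (String × Bool)))
    (rest : List (List (String × List (String × Bool)))) (k : String) (x : List (Int × Int)) :
    pvFold tol (pvFootStepsB k i (info :: rest)).1 x =
    pvFold tol (pvFootStepsB k (i + 1) rest).1
      (pvUpd tol i true ((info.lookup "foot_contacts").getD []) k x) := by
  cases hb : ((info.lookup "foot_contacts").getD []).lookup k with
  | none => simp [pvFootStepsB, pvUpd, hb]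
  | some b => cases b <;> simp [pvFootStepsB, pvUpd, pvFold, hb]

theorem pv_steps2 (tol i : Int) (info : List (String × List (String × Bool)))
    (rest : List (List (String × List (String × Bool)))) (k : String) (x : List (Int × Int)) :
    pvFold tol (pvFootStepsB k i (info :: rest)).2 x =
    pvFold tol (pvFootStepsB k (i + 1) rest).2
      (pvUpd tol i false ((info.lookup "foot_contacts").getD []) k x) := by
  cases hb : ((info.lookup "foot_contacts").getD []).lookup k with
  | none => simp [pvFootStepsB, pvUpd, hb]
  | some b => cases b <;> simp [pvFootStepsB, pvUpd, pvFold, hb]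

theorem pv_loop (tol : Int) :
    ∀ (ep : List (List (String × List (String × Bool)))),
    (∀ info ∈ ep,
      ((((info.lookup "foot_contacts").getD []).map Prod.fst).Nodup ∧
       ∀ p ∈ (info.lookup "foot_contacts").getD [], p.1 ∈ ["lf", "rf", "rh", "lh"])) →
    ∀ (i : Int) a b c d e f g h,
    pvLoopA tol i ep (pvQ a b c d, pvQ e f g h) =
    (pvQ (pvFold tol (pvFootStepsB "lf" i ep).1 a) (pvFold tol (pvFootStepsB "rf" i ep).1 b)
         (pvFold tol (pvFootStepsB "rh" i ep).1 c) (pvFold tol (pvFootStepsB "lh" i ep).1 d),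
     pvQ (pvFold tol (pvFootStepsB "lf" i ep).2 e) (pvFold tol (pvFootStepsB "rf" i ep).2 f)
         (pvFold tol (pvFootStepsB "rh" i ep).2 g) (pvFold tol (pvFootStepsB "lh" i ep).2 h)) := by
  intro ep
  induction ep with
  | nil =>
    intro _ i a b c d e f g h
    simp [pvLoopA, pvFootStepsB, pvFold]
  | cons info rest ih =>
    intro hpre i a b c d e f g h
    have h1 := hpre info (List.mem_cons_self ..)
    have hrest := ih (fun inf hi => hpre inf (List.mem_cons_of_mem _ hi))
    simp only [pvLoopA, pvStepA]
    rw [pv_inner tol i _ h1.1 h1.2]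
    rw [hrest]
    simp only [pv_steps1, pv_steps2]

-- ===== VERDICT (by name: the statement is the Claim_ definition above) =====
theorem build_foot_stride_phases_spec : Claim_equal_build_foot_stride_phases := by
  intro ep tol minp _ hpre
  unfold Spec_build_foot_stride_phases
  have hyp : ∀ info ∈ ep,
      ((((info.lookup "foot_contacts").getD []).map Prod.fst).Nodup ∧
       ∀ p ∈ (info.lookup "foot_contacts").getD [], p.1 ∈ ["lf", "rf", "rh", "lh"]) :=
    fun info hi => ⟨(hpre info hi).2.2.1, (hpre info hi).2.2.2⟩
  have hl := pv_loop tol ep hyp 0 [(1, 0)] [(1, 0)] [(1, 0)] [(1, 0)]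
      [(1, 0)] [(1, 0)] [(1, 0)] [(1, 0)]
  simp only [pvQ] at hl
  simp only [build_foot_stride_phases, build_foot_stride_phases_alt]
  rw [hl]
  simp [pvPhasesB_eq]
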